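-- pv_equiv track=rewrite | github.com/BartholomeLeBruno/CryptoDES | Bonus/chiffrementDES.py | decouperPar64
-- ===== SOURCE A (Python) =====
-- def decouperPar64(message):
--     messageParPaquet = dict()
--     msg = []
--     i = 0
--     j = 0
--     compt = 0
--     partieDuMessage = 0
--
--     while compt < len(message) :
--         msg.insert(i,message[compt])
--         compt+=1
--         i+=1
--         if compt%64==0 :
--             messageParPaquet[partieDuMessage]=msg
--             msg=[]
--             partieDuMessage+=1
--             i=0
--     if compt%64!=0 :
--         for i in range(i,64):
--             msg.insert(i,0)
--         messageParPaquet[partieDuMessage]=msg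
--
--     return messageParPaquet
-- ===== SOURCE B (Python) =====
-- def decouperPar64(message):
--     result = {}
--     for idx, start in enumerate(range(0, len(message), 64)):
--         chunk = list(message[start:start+64])
--         chunk += [0] * (64 - len(chunk))
--         result[idx] = chunk
--     return result
-- ===== Notes on version B (the rewrite author's own statement) =====
-- stated objective: simpler
-- what changed: Replaces the element-by-element insert loop with its modulo-64 counter/reset and the separate zero-padding insert loop by slicing at chunk boundaries (range with step 64 + slice + one pad append), keyed by enumerate.
import Mathlib
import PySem

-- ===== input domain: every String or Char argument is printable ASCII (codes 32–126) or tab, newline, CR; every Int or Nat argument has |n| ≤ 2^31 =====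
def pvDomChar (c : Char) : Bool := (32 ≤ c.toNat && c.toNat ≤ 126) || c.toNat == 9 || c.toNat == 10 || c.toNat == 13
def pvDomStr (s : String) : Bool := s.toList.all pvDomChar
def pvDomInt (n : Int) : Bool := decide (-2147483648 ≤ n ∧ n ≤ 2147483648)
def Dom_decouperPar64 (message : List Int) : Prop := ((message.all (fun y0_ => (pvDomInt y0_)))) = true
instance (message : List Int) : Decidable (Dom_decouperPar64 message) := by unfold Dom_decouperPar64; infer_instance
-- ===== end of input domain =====

-- B replaces A's element-by-element insert loop (with its modulo-64 counter/reset and a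
-- separate zero-padding insert loop) by slicing at chunk boundaries; same return value.

-- ===== PORT A =====
-- the while loop of A; fuel = number of remaining iterations (the loop consumes one list
-- element per iteration, so `message.length` iterations in total); state = (dict, msg, i, compt, partie)
def decouperPar64_while (message : List Int) :
    Nat → PySem.Dict Int (List Int) → List Int → Int → Int → Int →
    PySem.Dict Int (List Int) × List Int × Int × Int × Int
  | 0, d, msg, i, compt, partie => (d, msg, i, compt, partie)
  | fuel + 1, d, msg, i, compt, partie =>
    if compt < PySem.List.len message then
      let msg' := PySem.List.insert msg i (PySem.List.pyGetD message compt 0)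
      let compt' := compt + 1
      let i' := i + 1
      if PySem.Int.mod compt' 64 = 0 then
        decouperPar64_while message fuel (d.insert partie msg') [] 0 compt' (partie + 1)
      else
        decouperPar64_while message fuel d msg' i' compt' partie
    else (d, msg, i, compt, partie)

def decouperPar64 (message : List Int) : List (Int × List Int) :=
  let st := decouperPar64_while message message.length PySem.Dict.empty [] 0 0 0
  if PySem.Int.mod st.2.2.2.1 64 ≠ 0 then
    (st.1.insert st.2.2.2.2
      ((PySem.List.pyRange st.2.2.1 64 1).foldl (fun m j => PySem.List.insert m j 0) st.2.1)).items
  else st.1.items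

-- ===== PORT B =====
def decouperPar64_alt (message : List Int) : List (Int × List Int) :=
  ((PySem.List.enumerate (PySem.List.pyRange 0 (PySem.List.len message) 64)).foldl
    (fun result p =>
      let chunk := PySem.List.slice message (some p.2) (some (p.2 + 64))
      let chunk := chunk ++ List.replicate (64 - chunk.length) 0
      result.insert p.1 chunk)
    PySem.Dict.empty).items

-- ===== PRECONDITION & SPEC =====
def Spec_decouperPar64 (message : List Int) (out : List (Int × List Int)) : Prop := out = decouperPar64_alt message
instance (message : List Int) (out : List (Int × List Int)) : Decidable (Spec_decouperPar64 message out) := by unfold Spec_decouperPar64; infer_instance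

-- ===== CLAIM (what is proved, stated in full; the proofs are below) =====
def Claim_equal_decouperPar64 : Prop := ∀ (message : List Int), Dom_decouperPar64 message → Spec_decouperPar64 message (decouperPar64 message)

-- ===== LEMMAS AND PROOFS =====

-- reference chunking: 64-blocks of m, keys starting at k, last block zero-padded
def chunksSpec (m : List Int) (k : Int) : List (Int × List Int) :=
  if h : m = [] then []
  else (k, m.take 64 ++ List.replicate (64 - m.length) 0) :: chunksSpec (m.drop 64) (k + 1)
termination_by m.length
decreasing_by
  have : 0 < m.length := List.length_pos_iff.2 h
  simp [List.length_drop]; omega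

lemma chunksSpec_nil (k : Int) : chunksSpec [] k = [] := by rw [chunksSpec]; simp

lemma chunksSpec_cons {m : List Int} (h : m ≠ []) (k : Int) :
    chunksSpec m k = (k, m.take 64 ++ List.replicate (64 - m.length) 0) :: chunksSpec (m.drop 64) (k + 1) := by
  rw [chunksSpec]; simp [h]

-- step-64 range: induction forms
lemma pyRange64_nil {s n : Int} (h : n ≤ s) : PySem.List.pyRange s n 64 = [] := by
  rw [PySem.List.pyRange_of_pos _ _ (by norm_num : (0:Int) < 64), if_neg (by omega)]
  simp

lemma pyRange64_cons {s n : Int} (h : s < n) :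
    PySem.List.pyRange s n 64 = s :: PySem.List.pyRange (s + 64) n 64 := by
  rw [PySem.List.pyRange_of_pos _ _ (by norm_num : (0:Int) < 64),
      PySem.List.pyRange_of_pos _ _ (by norm_num : (0:Int) < 64)]
  rw [if_pos h]
  have hN : ((n - s + 64 - 1) / 64).toNat
      = (if s + 64 < n then ((n - (s + 64) + 64 - 1) / 64).toNat else 0) + 1 := by
    split_ifs with h2 <;> omega
  rw [hN, List.range_succ_eq_map]
  simp only [List.map_cons, List.map_map]
  congr 1
  · norm_num
  · apply List.map_congr_left
    intro a _
    simp only [Function.comp, Nat.succ_eq_add_one]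
    push_cast
    ring

-- the zero-padding loop of A appends zeros up to length 64
lemma padLemma : ∀ (c : Nat) (m : List Int), m.length + c = 64 →
    (PySem.List.pyRange (m.length : Int) 64 1).foldl (fun acc j => PySem.List.insert acc j 0) m
      = m ++ List.replicate c 0 := by
  intro c
  induction c with
  | zero =>
    intro m hm
    rw [PySem.List.pyRange_one_eq_nil (by omega)]
    simp
  | succ c ih =>
    intro m hm
    rw [PySem.List.pyRange_one_cons (by omega : (m.length : Int) < 64)]
    simp only [List.foldl_cons, PySem.List.insert_length]
    have h1 : ((m.length : Int) + 1) = ((m ++ [0]).length : Int) := by simp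
    rw [h1, ih (m ++ [0]) (by simp; omega)]
    simp [List.replicate_succ]

-- the code A runs after the while loop (A's trailing padding step), as a function of the final state
def finishA (st : PySem.Dict Int (List Int) × List Int × Int × Int × Int) : List (Int × List Int) :=
  if PySem.Int.mod st.2.2.2.1 64 ≠ 0 then
    (st.1.insert st.2.2.2.2
      ((PySem.List.pyRange st.2.2.1 64 1).foldl (fun m j => PySem.List.insert m j 0) st.2.1)).items
  else st.1.items

lemma fresh_of_keys_lt {d : PySem.Dict Int (List Int)} {partie : Int}
    (hkeys : ∀ p ∈ d.items, p.1 < partie) : d.contains partie = false := by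
  by_contra hc
  have : partie ∈ d.keys := (PySem.Dict.contains_iff_mem_keys d partie).1
    (by revert hc; cases d.contains partie <;> simp)
  simp only [PySem.Dict.keys, List.mem_map] at this
  obtain ⟨p, hp, hfst⟩ := this
  exact absurd (hkeys p hp) (by omega)

-- invariant of A's while loop, combined with A's trailing padding step:
-- pfx is the consumed prefix, rest the remaining input, msg the current partial block
lemma whileA_spec : ∀ (rest pfx msg : List Int) (d : PySem.Dict Int (List Int)) (partie : Int),
    msg.length < 64 →
    (pfx.length : Int) = 64 * partie + msg.length →
    (∀ p ∈ d.items, p.1 < partie) →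
    finishA (decouperPar64_while (pfx ++ rest) rest.length d msg (msg.length : Int) (pfx.length : Int) partie)
    = d.items ++ chunksSpec (msg ++ rest) partie := by
  intro rest
  induction rest with
  | nil =>
    intro pfx msg d partie hlt hlen hkeys
    simp only [List.length_nil, decouperPar64_while, List.append_nil]
    have hmod : PySem.Int.mod (pfx.length : Int) 64 = (msg.length : Int) := by
      rw [PySem.Int.mod_eq_emod_of_pos (by norm_num)]
      omega
    by_cases hm : msg = []
    · subst hm
      have hlen0 : (pfx.length : Int) = 64 * partie := by simpa using hlen
      unfold finishA
      rw [if_neg (by simp; omega)]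
      simp [chunksSpec_nil]
    · have hne : (msg.length : Int) ≠ 0 := by
        simpa using fun h => hm (List.length_eq_zero_iff.1 h)
      unfold finishA
      rw [if_pos (by simp only [hmod]; exact hne)]
      simp only
      rw [padLemma (64 - msg.length) msg (by omega),
          PySem.Dict.items_insert_of_not_contains d _ (fresh_of_keys_lt hkeys),
          chunksSpec_cons hm, List.drop_eq_nil_of_le (by omega), chunksSpec_nil,
          List.take_of_length_le (by omega)]
  | cons x rest' ih =>
    intro pfx msg d partie hlt hlen hkeys
    simp only [List.length_cons, decouperPar64_while]
    have hcond : (pfx.length : Int) < PySem.List.len (pfx ++ x :: rest') := by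
      simp [PySem.List.len_eq]
    rw [if_pos hcond]
    have hget : PySem.List.pyGetD (pfx ++ x :: rest') (pfx.length : Int) 0 = x := by
      rw [PySem.List.pyGetD_natCast]
      simp [List.getD]
    simp only [hget, PySem.List.insert_length]
    by_cases h63 : msg.length = 63
    · have hc : PySem.Int.mod ((pfx.length : Int) + 1) 64 = 0 := by
        rw [PySem.Int.mod_eq_emod_of_pos (by norm_num)]; omega
      rw [if_pos hc]
      have hfreshI : ∀ p ∈ (d.insert partie (msg ++ [x])).items, p.1 < partie + 1 := by
        intro p hp
        rw [PySem.Dict.items_insert_of_not_contains d _ (fresh_of_keys_lt hkeys)] at hp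
        rcases List.mem_append.1 hp with h | h
        · have := hkeys p h; omega
        · rw [List.mem_singleton] at h
          subst h
          show partie < partie + 1
          omega
      have H := ih (pfx ++ [x]) [] (d.insert partie (msg ++ [x])) (partie + 1)
        (by simp)
        (by simp only [List.length_append, List.length_cons, List.length_nil,
              Nat.cast_add, Nat.cast_one, Nat.cast_zero]; omega)
        hfreshI
      simp only [List.length_append, List.length_cons, List.length_nil, List.append_assoc,
        List.singleton_append, Nat.cast_add, Nat.cast_one, Nat.cast_zero, List.nil_append, zero_add] at H
      rw [H, PySem.Dict.items_insert_of_not_contains d _ (fresh_of_keys_lt hkeys),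
          chunksSpec_cons (by simp) partie]
      have h1 : 64 - msg.length = 1 := by omega
      have htake : (msg ++ x :: rest').take 64 = msg ++ [x] := by
        rw [List.take_append, List.take_of_length_le (by omega), h1]
        simp
      have hdrop : (msg ++ x :: rest').drop 64 = rest' := by
        rw [List.drop_append, List.drop_eq_nil_of_le (by omega), h1]
        simp
      have hrep : List.replicate (64 - (msg ++ x :: rest').length) (0 : Int) = [] := by
        simp; omega
      rw [htake, hdrop, hrep]
      simp
    · have hc : ¬ PySem.Int.mod ((pfx.length : Int) + 1) 64 = 0 := by
        rw [PySem.Int.mod_eq_emod_of_pos (by norm_num)]; omega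
      rw [if_neg hc]
      have H := ih (pfx ++ [x]) (msg ++ [x]) d partie
        (by simp; omega)
        (by simp only [List.length_append, List.length_cons, List.length_nil,
              Nat.cast_add, Nat.cast_one, Nat.cast_zero]; omega)
        hkeys
      simp only [List.length_append, List.length_cons, List.length_nil, List.append_assoc,
        List.singleton_append, Nat.cast_add, Nat.cast_one, zero_add] at H
      rw [H]

-- B's per-chunk value
lemma chunkB_eq (message : List Int) (s : Int) (hs : 0 ≤ s) :
    (let c := PySem.List.slice message (some s) (some (s + 64))
     c ++ List.replicate (64 - c.length) (0 : Int))
    = (message.drop s.toNat).take 64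
      ++ List.replicate (64 - (message.drop s.toNat).length) (0 : Int) := by
  have h64 : (s + 64).toNat - s.toNat = 64 := by omega
  rw [PySem.List.slice_toNat _ hs (by omega), h64]
  show List.take 64 (List.drop s.toNat message)
      ++ List.replicate (64 - (List.take 64 (List.drop s.toNat message)).length) 0 = _
  have h2 : 64 - (List.take 64 (List.drop s.toNat message)).length
      = 64 - (List.drop s.toNat message).length := by
    simp
    omega
  rw [h2]

-- B's enumerate-over-range loop produces exactly the reference chunking
lemma altB_spec : ∀ (fuel : Nat) (message : List Int) (s k : Int), 0 ≤ s →
    ((message.length : Int) - s).toNat ≤ 64 * fuel →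
    (PySem.List.enumerate (PySem.List.pyRange s (message.length : Int) 64) k).map
      (fun p => (p.1,
        (let chunk := PySem.List.slice message (some p.2) (some (p.2 + 64))
         chunk ++ List.replicate (64 - chunk.length) 0)))
    = chunksSpec (message.drop s.toNat) k := by
  intro fuel
  induction fuel with
  | zero =>
    intro message s k hs hfuel
    rw [pyRange64_nil (by omega), List.drop_eq_nil_of_le (by omega), chunksSpec_nil]
    simp [PySem.List.enumerate]
  | succ fuel ih =>
    intro message s k hs hfuel
    by_cases hlt : s < (message.length : Int)
    · rw [pyRange64_cons hlt, PySem.List.enumerate_cons, List.map_cons]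
      have hrest : message.drop s.toNat ≠ [] := by
        simp [List.drop_eq_nil_iff]
        omega
      rw [chunksSpec_cons hrest k]
      congr 1
      · exact congrArg (fun c => (k, c)) (chunkB_eq message s hs)
      · have harg : (message.drop s.toNat).drop 64 = message.drop ((s + 64).toNat) := by
          rw [List.drop_drop]
          congr 1
          omega
        rw [ih message (s + 64) (k + 1) (by omega) (by omega), harg]
    · rw [pyRange64_nil (by omega), List.drop_eq_nil_of_le (by omega), chunksSpec_nil]
      simp [PySem.List.enumerate]

lemma decouperPar64_eq_chunksSpec (message : List Int) :
    decouperPar64 message = chunksSpec message 0 := by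
  have h := whileA_spec message [] [] PySem.Dict.empty 0 (by simp) (by simp)
    (by intro p hp; simp [PySem.Dict.empty] at hp)
  simp only [List.length_nil, Nat.cast_zero, List.nil_append] at h
  have : decouperPar64 message
      = finishA (decouperPar64_while message message.length PySem.Dict.empty [] 0 0 0) := rfl
  rw [this, h]
  simp [PySem.Dict.empty]

lemma decouperPar64_alt_eq_chunksSpec (message : List Int) :
    decouperPar64_alt message = chunksSpec message 0 := by
  have hfold := PySem.Dict.items_foldl_insert_fresh
    (PySem.List.enumerate (PySem.List.pyRange 0 (PySem.List.len message) 64))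
    (fun p : Int × Int => p.1)
    (fun p : Int × Int =>
      (let chunk := PySem.List.slice message (some p.2) (some (p.2 + 64))
       chunk ++ List.replicate (64 - chunk.length) 0))
    PySem.Dict.empty (fun _ _ => rfl)
    (by rw [PySem.List.map_fst_enumerate]; exact PySem.List.nodup_pyRange_one _ _)
  have h0 : decouperPar64_alt message
      = (List.foldl
          (fun d a => d.insert ((fun p : Int × Int => p.1) a)
            ((fun p : Int × Int =>
              (let chunk := PySem.List.slice message (some p.2) (some (p.2 + 64))
               chunk ++ List.replicate (64 - chunk.length) 0)) a))
          PySem.Dict.empty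
          (PySem.List.enumerate (PySem.List.pyRange 0 (PySem.List.len message) 64))).items := rfl
  have h1 : (PySem.List.enumerate (PySem.List.pyRange 0 (PySem.List.len message) 64)).map
        (fun a => ((fun p : Int × Int => p.1) a,
          (fun p : Int × Int =>
            (let chunk := PySem.List.slice message (some p.2) (some (p.2 + 64))
             chunk ++ List.replicate (64 - chunk.length) 0)) a))
      = (PySem.List.enumerate (PySem.List.pyRange 0 (PySem.List.len message) 64)).map
        (fun p => (p.1,
          (let chunk := PySem.List.slice message (some p.2) (some (p.2 + 64))
           chunk ++ List.replicate (64 - chunk.length) 0))) := rfl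
  rw [h0, hfold, h1]
  have hlen : PySem.List.len message = (message.length : Int) := PySem.List.len_eq message
  rw [hlen, altB_spec message.length message 0 0 (le_refl 0) (by omega)]
  simp [PySem.Dict.empty]

-- ===== VERDICT (by name: the statement is the Claim_ definition above) =====
theorem decouperPar64_spec : Claim_equal_decouperPar64 := by
  intro message _
  show decouperPar64 message = decouperPar64_alt message
  rw [decouperPar64_eq_chunksSpec, decouperPar64_alt_eq_chunksSpec]
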